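-- pv_equiv track=rewrite | github.com/fadhilkurnia/xdn | eval/run_microbench_fuse_sdsize_db.py | required_app_images
-- ===== SOURCE A (Python) =====
-- BOOKCATALOG_IMAGE = "mb-bookcatalog-sdsize"
--
-- BOOKCATALOG_MONGO_IMAGE = "mb-bookcatalog-mongo-sdsize"
--
-- def required_app_images(backends: list[str]) -> set[str]:
--     images: set[str] = set()
--     for backend in backends:
--         if backend == "mongodb":
--             images.add(BOOKCATALOG_MONGO_IMAGE)
--         else:
--             images.add(BOOKCATALOG_IMAGE)
--     return images
-- ===== SOURCE B (Python) =====
-- BOOKCATALOG_IMAGE = "mb-bookcatalog-sdsize"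
--
-- BOOKCATALOG_MONGO_IMAGE = "mb-bookcatalog-mongo-sdsize"
--
--
-- def required_app_images(backends: list[str]) -> set[str]:
--     # divide and conquer: the images of a list are the images of its left half
--     # unioned with the images of its right half; a singleton is classified directly
--     if not backends:
--         return set()
--     if len(backends) == 1:
--         return {BOOKCATALOG_MONGO_IMAGE if backends[0] == "mongodb" else BOOKCATALOG_IMAGE}
--     mid = len(backends) // 2
--     return required_app_images(backends[:mid]) | required_app_images(backends[mid:])
-- ===== Notes on version B (the rewrite author's own statement) =====
-- stated objective: alternative
-- what changed: Replaces the single accumulating loop over the backends by a divide-and-conquer recursion: split the list at its midpoint, compute each half's image set recursively, and return the union of the two halves (singletons classified directly).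
import Mathlib
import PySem

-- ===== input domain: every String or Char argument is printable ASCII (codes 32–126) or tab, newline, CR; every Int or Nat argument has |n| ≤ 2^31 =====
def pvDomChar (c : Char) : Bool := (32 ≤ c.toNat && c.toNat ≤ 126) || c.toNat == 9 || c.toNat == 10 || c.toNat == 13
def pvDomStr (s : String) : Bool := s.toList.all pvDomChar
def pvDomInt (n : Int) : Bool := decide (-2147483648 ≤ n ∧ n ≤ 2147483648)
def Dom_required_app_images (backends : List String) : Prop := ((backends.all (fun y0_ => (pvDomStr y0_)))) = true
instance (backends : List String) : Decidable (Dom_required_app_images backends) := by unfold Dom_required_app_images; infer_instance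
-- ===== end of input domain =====

-- B replaces A's accumulating loop by a divide-and-conquer recursion (split at the midpoint, union the two halves' image sets); same results, different decomposition. Return-value equivalence (Python returns a set; ported as its distinct-elements list in first-insertion order).
-- ===== PORT A =====
def required_app_images (backends : List String) : List String :=
  backends.foldl
    (fun images backend =>
      if backend = "mongodb" then PySem.Set.add images "mb-bookcatalog-mongo-sdsize"
      else PySem.Set.add images "mb-bookcatalog-sdsize")
    PySem.Set.empty

-- ===== PORT B =====
def required_app_images_alt (backends : List String) : List String :=
  if h0 : backends = [] then PySem.Set.empty
  else if h1 : backends.length = 1 then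
    -- backends[0]: the list is nonempty here, so the total pyGetD is exact
    PySem.Set.add PySem.Set.empty
      (if PySem.List.pyGetD backends 0 "" = "mongodb" then "mb-bookcatalog-mongo-sdsize"
       else "mb-bookcatalog-sdsize")
  else
    let mid := PySem.Int.floordiv (backends.length : Int) 2
    PySem.Set.union
      (required_app_images_alt (PySem.List.slice backends none (some mid)))
      (required_app_images_alt (PySem.List.slice backends (some mid) none))
termination_by backends.length
decreasing_by
  · have h2 : 2 ≤ backends.length := by
      rcases backends with _ | ⟨a, l⟩
      · exact absurd rfl h0
      · simp only [List.length_cons] at h1 ⊢; omega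
    have hm : PySem.Int.floordiv (backends.length : Int) 2 = ((backends.length / 2 : Nat) : Int) := by
      exact_mod_cast PySem.Int.floordiv_natCast backends.length 2
    rw [hm, PySem.List.slice_to_natCast]
    simp [List.length_take]
    omega
  · have h2 : 2 ≤ backends.length := by
      rcases backends with _ | ⟨a, l⟩
      · exact absurd rfl h0
      · simp only [List.length_cons] at h1 ⊢; omega
    have hm : PySem.Int.floordiv (backends.length : Int) 2 = ((backends.length / 2 : Nat) : Int) := by
      exact_mod_cast PySem.Int.floordiv_natCast backends.length 2
    rw [hm, PySem.List.slice_from_natCast]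
    simp [List.length_drop]
    omega

-- ===== PRECONDITION & SPEC =====
def Spec_required_app_images (backends : List String) (out : List String) : Prop := out = required_app_images_alt backends
instance (backends : List String) (out : List String) : Decidable (Spec_required_app_images backends out) := by unfold Spec_required_app_images; infer_instance

-- ===== CLAIM (what is proved, stated in full; the proofs are below) =====
def Claim_equal_required_app_images : Prop := ∀ (backends : List String), Dom_required_app_images backends → Spec_required_app_images backends (required_app_images backends)

-- ===== LEMMAS AND PROOFS =====

def pvImageFor (backend : String) : String :=
  if backend = "mongodb" then "mb-bookcatalog-mongo-sdsize" else "mb-bookcatalog-sdsize"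

-- A's loop is set(map(pvImageFor, backends)) in first-insertion order
theorem pv_A_eq (backends : List String) :
    required_app_images backends = PySem.Set.ofList (backends.map pvImageFor) := by
  unfold required_app_images
  have hfun :
      (fun (images : List String) backend =>
        if backend = "mongodb" then PySem.Set.add images "mb-bookcatalog-mongo-sdsize"
        else PySem.Set.add images "mb-bookcatalog-sdsize")
      = fun images backend => PySem.Set.add images (pvImageFor backend) := by
    funext images backend
    unfold pvImageFor
    split_ifs <;> rfl
  rw [hfun, ← PySem.Set.update_map_eq_foldl_add, PySem.Set.update_empty]

theorem pv_update_ofList {α : Type} [BEq α] [LawfulBEq α] (s : PySem.Set α) (ys : List α) :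
    PySem.Set.update s (PySem.Set.ofList ys) = PySem.Set.update s ys := by
  rw [PySem.Set.update_eq_append_filter, PySem.Set.update_eq_append_filter, PySem.Set.ofList_ofList]

theorem pv_union_ofList (xs ys : List String) :
    PySem.Set.union (PySem.Set.ofList xs) (PySem.Set.ofList ys)
      = PySem.Set.ofList (xs ++ ys) := by
  show PySem.Set.update (PySem.Set.ofList xs) (PySem.Set.ofList ys) = _
  rw [pv_update_ofList, PySem.Set.ofList_append]

theorem pv_B_eq (backends : List String) :
    required_app_images_alt backends = PySem.Set.ofList (backends.map pvImageFor) := by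
  fun_induction required_app_images_alt backends
  case case1 => rfl
  case case2 l hne h1 =>
    obtain ⟨b, rfl⟩ := List.length_eq_one_iff.mp h1
    simp [PySem.List.pyGetD_zero_cons, pvImageFor, PySem.Set.add, PySem.Set.ofList,
      PySem.Set.empty]
  case case3 l hne h1 mid ih2 ih1 =>
    have hm : mid = ((l.length / 2 : Nat) : Int) := by
      show PySem.Int.floordiv (l.length : Int) 2 = _
      exact_mod_cast PySem.Int.floordiv_natCast l.length 2
    rw [ih1, ih2, hm, PySem.List.slice_to_natCast, PySem.List.slice_from_natCast,
      pv_union_ofList, ← List.map_append, List.take_append_drop]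

-- ===== VERDICT (by name: the statement is the Claim_ definition above) =====
theorem required_app_images_spec : Claim_equal_required_app_images := by
  intro backends _
  unfold Spec_required_app_images
  rw [pv_A_eq, pv_B_eq]
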